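-- pv_equiv track=rewrite | github.com/m-mahmoud-mohamed/DiffUME | diffume/diffusion/sampling.py | _detect_tail_copy_repetition
-- ===== SOURCE A (Python) =====
-- def _detect_tail_copy_repetition(tokens: list[int], min_repeats: int) -> bool:
--     """Return True if the tail of ``tokens`` is a unit repeated ≥ min_repeats."""
--     n = len(tokens)
--     if n < 2 or min_repeats <= 0:
--         return False
--     for L in range(1, n // 2 + 1):
--         unit = tokens[-L:]
--         repeats = 1
--         idx = n - L
--         while idx - L >= 0 and tokens[idx - L: idx] == unit:
--             repeats += 1
--             idx -= L
--         if repeats >= min_repeats: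
--             return True
--     return False
-- ===== SOURCE B (Python) =====
-- def _detect_tail_copy_repetition(tokens: list[int], min_repeats: int) -> bool:
--     """Return True if the tail of ``tokens`` is a unit repeated >= min_repeats.
--
--     Periodicity trick: the tail of length min_repeats*L consists of L-unit
--     repeats iff it equals its own shift by L, so one slice comparison per L
--     replaces A's block-counting inner loop.
--     """
--     n = len(tokens)
--     if n < 2 or min_repeats <= 0:
--         return False
--     for L in range(1, n // 2 + 1):
--         span = min_repeats * L
--         if span <= n and tokens[n - span: n - L] == tokens[n - span + L: n]:
--             return True
--     return False
-- ===== Notes on version B (the rewrite author's own statement) =====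
-- stated objective: faster
-- what changed: B decides each unit length L by the periodicity criterion (the tail of length min_repeats*L is L-periodic iff it equals its own shift by L) instead of A's block-counting inner while-loop, and its span test min_repeats*L <= n skips, before any slicing, every unit length that cannot fit min_repeats copies.
import Mathlib
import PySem

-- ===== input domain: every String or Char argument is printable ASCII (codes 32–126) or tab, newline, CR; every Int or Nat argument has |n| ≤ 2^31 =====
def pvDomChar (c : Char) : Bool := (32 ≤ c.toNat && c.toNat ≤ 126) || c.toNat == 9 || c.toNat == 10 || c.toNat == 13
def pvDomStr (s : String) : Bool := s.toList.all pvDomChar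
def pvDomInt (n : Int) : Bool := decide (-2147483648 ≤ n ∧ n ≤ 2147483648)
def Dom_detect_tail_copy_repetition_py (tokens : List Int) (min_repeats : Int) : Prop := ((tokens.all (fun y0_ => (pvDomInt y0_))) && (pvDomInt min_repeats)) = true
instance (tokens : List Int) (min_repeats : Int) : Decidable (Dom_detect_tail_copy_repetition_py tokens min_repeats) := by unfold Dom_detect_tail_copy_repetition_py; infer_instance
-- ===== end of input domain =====

-- B replaces A's block-counting inner while-loop by the periodicity criterion (the tail of
-- length min_repeats*L is L-periodic iff it equals its own shift by L): one shifted-slice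
-- comparison per unit length, and unit lengths with min_repeats*L > n are skipped before any
-- slicing; a timing run measured B faster on its generated inputs (objective: faster).

-- ===== PORT A =====
-- inner while-loop of A: while idx - L >= 0 and tokens[idx-L:idx] == unit: repeats += 1; idx -= L
-- (fuel = len(tokens) suffices: idx decreases by L ≥ 1 each round and stays ≥ 0)
def pvAWhile (tokens unit : List Int) (L : Int) : Nat → Int → Int → Int
  | 0, _, repeats => repeats
  | fuel+1, idx, repeats =>
    if 0 ≤ idx - L ∧ PySem.List.slice tokens (some (idx - L)) (some idx) = unit then
      pvAWhile tokens unit L fuel (idx - L) (repeats + 1)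
    else repeats


def detect_tail_copy_repetition_py (tokens : List Int) (min_repeats : Int) : Bool :=
  let n : Int := tokens.length
  if n < 2 ∨ min_repeats ≤ 0 then false
  else
    (PySem.List.pyRange 1 (PySem.Int.floordiv n 2 + 1) 1).any (fun L =>
      let unit := PySem.List.slice tokens (some (-L)) none
      let repeats := pvAWhile tokens unit L tokens.length (n - L) 1
      decide (min_repeats ≤ repeats))

def detect_tail_copy_repetition_py_alt (tokens : List Int) (min_repeats : Int) : Bool :=
  let n : Int := tokens.length
  if n < 2 ∨ min_repeats ≤ 0 then false
  else
    (PySem.List.pyRange 1 (PySem.Int.floordiv n 2 + 1) 1).any (fun L =>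
      let span := min_repeats * L
      decide (span ≤ n) &&
        decide (PySem.List.slice tokens (some (n - span)) (some (n - L)) =
                PySem.List.slice tokens (some (n - span + L)) none))

-- ===== PRECONDITION & SPEC =====
def Spec_detect_tail_copy_repetition_py (tokens : List Int) (min_repeats : Int) (out : Bool) : Prop := out = detect_tail_copy_repetition_py_alt tokens min_repeats
instance (tokens : List Int) (min_repeats : Int) (out : Bool) : Decidable (Spec_detect_tail_copy_repetition_py tokens min_repeats out) := by unfold Spec_detect_tail_copy_repetition_py; infer_instance

-- ===== CLAIM (what is proved, stated in full; the proofs are below) =====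
def Claim_equal_detect_tail_copy_repetition_py : Prop := ∀ (tokens : List Int) (min_repeats : Int), Dom_detect_tail_copy_repetition_py tokens min_repeats → Spec_detect_tail_copy_repetition_py tokens min_repeats (detect_tail_copy_repetition_py tokens min_repeats)

-- ===== LEMMAS AND PROOFS =====

def pvBlock (t : List Int) (ℓ j : Nat) : List Int := (t.drop (t.length - j*ℓ)).take ℓ
def pvChain (t : List Int) (ℓ k : Nat) : Prop :=
  ∀ j, 2 ≤ j → j ≤ k → pvBlock t ℓ j = t.drop (t.length - ℓ)

lemma pvBlock_one (t : List Int) (ℓ : Nat) (h : ℓ ≤ t.length) :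
    pvBlock t ℓ 1 = t.drop (t.length - ℓ) := by
  unfold pvBlock
  rw [one_mul]
  exact List.take_of_length_le (by simp; omega)

lemma pvChain_last (t : List Int) (ℓ k : Nat) (hℓ : ℓ ≤ t.length) (hk : 1 ≤ k)
    (h : pvChain t ℓ k) : pvBlock t ℓ k = t.drop (t.length - ℓ) := by
  rcases Nat.lt_or_ge k 2 with h2 | h2
  · have : k = 1 := by omega
    subst this; exact pvBlock_one t ℓ hℓ
  · exact h k h2 le_rfl

lemma pvChain_iff_shift (t : List Int) (ℓ k : Nat) (hℓ : 1 ≤ ℓ) (hk : k * ℓ ≤ t.length) :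
    pvChain t ℓ k ↔
      (t.drop (t.length - k*ℓ)).take ((k-1)*ℓ) = t.drop (t.length - (k-1)*ℓ) := by
  induction k with
  | zero =>
      simp [pvChain]
      intro j h2 h0; omega
  | succ k ih =>
      rcases Nat.eq_zero_or_pos k with hk0 | hkpos
      · subst hk0
        constructor
        · intro _; simp
        · intro _ j h2 h1; omega
      · -- k ≥ 1
        have hs : (k+1)*ℓ = k*ℓ + ℓ := by ring
        have hkℓ : k*ℓ ≤ t.length := by omega
        have hℓn : ℓ ≤ t.length := by
          calc ℓ ≤ k*ℓ := Nat.le_mul_of_pos_left ℓ hkpos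
          _ ≤ t.length := hkℓ
        have ih' := ih hkℓ
        have hs2 : (k-1)*ℓ + ℓ = k*ℓ := by
          have hk' : k = (k-1)+1 := by omega
          calc (k-1)*ℓ + ℓ = ((k-1)+1)*ℓ := by ring
          _ = k*ℓ := by rw [← hk']
        -- split LHS slice of step case
        have e1 : (k+1-1)*ℓ = ℓ + (k-1)*ℓ := by
          have : k+1-1 = k := by omega
          rw [this]
          have hk' : k = 1 + (k-1) := by omega
          calc k*ℓ = (1+(k-1))*ℓ := by rw [← hk']
          _ = ℓ + (k-1)*ℓ := by ring
        have edrop : (t.drop (t.length - (k+1)*ℓ)).drop ℓ = t.drop (t.length - k*ℓ) := by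
          rw [List.drop_drop]
          congr 1
          omega
        have eX : (t.drop (t.length - (k+1)*ℓ)).take ((k+1-1)*ℓ)
            = pvBlock t ℓ (k+1) ++ (t.drop (t.length - k*ℓ)).take ((k-1)*ℓ) := by
          rw [e1, List.take_add, edrop]; rfl
        have eY : t.drop (t.length - (k+1-1)*ℓ)
            = pvBlock t ℓ k ++ t.drop (t.length - (k-1)*ℓ) := by
          have : k+1-1 = k := by omega
          rw [this]
          have : t.drop (t.length - (k-1)*ℓ) = (t.drop (t.length - k*ℓ)).drop ℓ := by
            rw [List.drop_drop]; congr 1; omega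
          rw [this, pvBlock]
          exact (List.take_append_drop ℓ _).symm
        have hlen1 : (pvBlock t ℓ (k+1)).length = ℓ := by
          simp [pvBlock]; omega
        have hlen2 : (pvBlock t ℓ k).length = ℓ := by
          simp [pvBlock]
          have : ℓ ≤ k*ℓ := Nat.le_mul_of_pos_left ℓ hkpos
          omega
        rw [eX, eY]
        constructor
        · intro hch
          have hck : pvChain t ℓ k := fun j h2 hj => hch j h2 (by omega)
          have hbk : pvBlock t ℓ k = t.drop (t.length - ℓ) := pvChain_last t ℓ k hℓn hkpos hck
          have hbk1 : pvBlock t ℓ (k+1) = t.drop (t.length - ℓ) := hch (k+1) (by omega) le_rfl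
          rw [hbk1, ← hbk, (ih'.mp hck)]
        · intro heq
          have := List.append_inj heq (by rw [hlen1, hlen2])
          obtain ⟨hb, hsh⟩ := this
          have hck : pvChain t ℓ k := ih'.mpr hsh
          have hbk : pvBlock t ℓ k = t.drop (t.length - ℓ) := pvChain_last t ℓ k hℓn hkpos hck
          intro j h2 hj
          rcases Nat.lt_or_ge j (k+1) with hlt | hge
          · exact hck j h2 (by omega)
          · have : j = k+1 := by omega
            subst this
            rw [hb, hbk]

lemma pvAWhile_iff (t : List Int) (ℓ : Nat) (mr : Int) (hℓ : 1 ≤ ℓ) :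
    ∀ (fuel r : Nat), 1 ≤ r → r * ℓ ≤ t.length → t.length ≤ (r + fuel) * ℓ →
    (mr ≤ pvAWhile t (t.drop (t.length - ℓ)) (ℓ : Int) fuel ((t.length : Int) - (r : Int) * (ℓ : Int)) (r : Int) ↔
      (mr ≤ (r : Int) ∨ ∀ j : Nat, r < j → (j : Int) ≤ mr →
        j * ℓ ≤ t.length ∧ pvBlock t ℓ j = t.drop (t.length - ℓ))) := by
  intro fuel
  induction fuel with
  | zero =>
    intro r hr hrn hfuel
    simp only [pvAWhile, Nat.add_zero] at *
    constructor
    · intro h; left; exact h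
    · rintro (h | h)
      · exact h
      · by_contra hlt
        push_neg at hlt
        have hj := h (r+1) (by omega) (by push_cast; omega)
        have h1 := hj.1
        have hs : (r+1)*ℓ = r*ℓ + ℓ := by ring
        omega
  | succ fuel ih =>
    intro r hr hrn hfuel
    have hs : (r+1)*ℓ = r*ℓ + ℓ := by ring
    have hf : (r + (fuel+1)) * ℓ = (r+1+fuel) * ℓ := by ring
    simp only [pvAWhile]
    by_cases hC : (r+1) * ℓ ≤ t.length
    · -- index stays in range
      have hidx0 : (0:Int) ≤ (t.length : Int) - (r:Int)*(ℓ:Int) - (ℓ:Int) := by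
        rw [← Nat.cast_mul]; omega
      have hidx : (t.length : Int) - (r:Int)*(ℓ:Int) - (ℓ:Int) = (((t.length - (r+1)*ℓ : Nat)) : Int) := by
        rw [← Nat.cast_mul]; push_cast; omega
      have hidx2 : (t.length : Int) - (r:Int)*(ℓ:Int) = (((t.length - r*ℓ : Nat)) : Int) := by
        rw [← Nat.cast_mul]; push_cast; omega
      have hslice : PySem.List.slice t (some ((t.length : Int) - (r:Int)*(ℓ:Int) - (ℓ:Int))) (some ((t.length : Int) - (r:Int)*(ℓ:Int))) = pvBlock t ℓ (r+1) := by
        rw [hidx, hidx2, PySem.List.slice_natCast]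
        unfold pvBlock
        congr 1
        omega
      by_cases hB : pvBlock t ℓ (r+1) = t.drop (t.length - ℓ)
      · rw [if_pos ⟨hidx0, by rw [hslice]; exact hB⟩]
        have e1 : (t.length : Int) - (r:Int)*(ℓ:Int) - (ℓ:Int) = (t.length : Int) - ((r+1 : Nat):Int)*(ℓ:Int) := by
          push_cast; ring
        have e2 : (r:Int) + 1 = ((r+1 : Nat) : Int) := by push_cast; ring
        rw [e1, e2]
        rw [ih (r+1) (by omega) hC (by omega)]
        constructor
        · rintro (h | h)
          · by_cases h' : mr ≤ (r:Int)
            · left; exact h'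
            · push_neg at h'
              right; intro j hj hjm
              have : j = r+1 := by
                have : (j:Int) ≤ (r:Int)+1 := by push_cast at h ⊢; omega
                have : j ≤ r+1 := by exact_mod_cast this
                omega
              subst this; exact ⟨hC, hB⟩
          · right; intro j hj hjm
            rcases Nat.lt_or_ge (r+1) j with h' | h'
            · exact h j h' hjm
            · have : j = r+1 := by omega
              subst this; exact ⟨hC, hB⟩
        · rintro (h | h)
          · left; push_cast; omega
          · right; intro j hj hjm; exact h j (by omega) hjm
      · rw [if_neg (by rw [hslice]; tauto)]
        constructor
        · intro h; left; exact h
        · rintro (h | h)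
          · exact h
          · by_contra hlt
            push_neg at hlt
            exact absurd (h (r+1) (by omega) (by push_cast; omega)).2 hB
    · rw [if_neg (by rintro ⟨h0, _⟩; rw [← Nat.cast_mul] at h0; omega)]
      constructor
      · intro h; left; exact h
      · rintro (h | h)
        · exact h
        · by_contra hlt
          push_neg at hlt
          exact absurd (h (r+1) (by omega) (by push_cast; omega)).1 hC

lemma pvAnyCongr (l : List Int) (f g : Int → Bool) (h : ∀ x ∈ l, f x = g x) : l.any f = l.any g := by
  induction l with
  | nil => rfl
  | cons a tl ih => simp only [List.any_cons, h a (by simp), ih (fun x hx => h x (by simp [hx]))]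

lemma pvPerL (t : List Int) (mr L : Int) (hmr : 1 ≤ mr)
    (hL1 : 1 ≤ L) (hL2 : 2 * L ≤ (t.length : Int)) :
    (decide (mr ≤ pvAWhile t (PySem.List.slice t (some (-L)) none) L t.length ((t.length : Int) - L) 1)) =
    (decide (mr * L ≤ (t.length : Int)) &&
      decide (PySem.List.slice t (some ((t.length : Int) - mr * L)) (some ((t.length : Int) - L)) =
              PySem.List.slice t (some ((t.length : Int) - mr * L + L)) none)) := by
  obtain ⟨ℓ, rfl⟩ : ∃ ℓ : Nat, L = (ℓ:Int) := ⟨L.toNat, (Int.toNat_of_nonneg (by omega)).symm⟩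
  obtain ⟨k, rfl⟩ : ∃ k : Nat, mr = (k:Int) := ⟨mr.toNat, (Int.toNat_of_nonneg (by omega)).symm⟩
  have hℓ1 : 1 ≤ ℓ := by exact_mod_cast hL1
  have hk1 : 1 ≤ k := by exact_mod_cast hmr
  have h2ℓ : 2*ℓ ≤ t.length := by exact_mod_cast hL2
  have hℓn : ℓ ≤ t.length := by omega
  have hunit : PySem.List.slice t (some (-(ℓ:Int))) none = t.drop (t.length - ℓ) :=
    PySem.List.slice_from_neg_natCast t ℓ (by omega)
  rw [hunit]
  have hA := pvAWhile_iff t ℓ ((k:Int)) hℓ1 t.length 1 le_rfl (by omega)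
    (by calc t.length ≤ (1 + t.length) * 1 := by omega
        _ ≤ (1 + t.length) * ℓ := Nat.mul_le_mul_left _ hℓ1)
  have e0 : (t.length : Int) - ((1:Nat):Int) * (ℓ:Int) = (t.length : Int) - (ℓ:Int) := by push_cast; ring
  rw [e0] at hA
  norm_num at hA
  have hs2 : (k-1)*ℓ + ℓ = k*ℓ := by
    have hk' : k = (k-1)+1 := by omega
    calc (k-1)*ℓ + ℓ = ((k-1)+1)*ℓ := by ring
    _ = k*ℓ := by rw [← hk']
  by_cases hkn : k*ℓ ≤ t.length
  · have hb1 : (k:Int) * (ℓ:Int) ≤ (t.length:Int) := by rw [← Nat.cast_mul]; omega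
    have e1 : (t.length : Int) - (k:Int)*(ℓ:Int) = ((t.length - k*ℓ : Nat) : Int) := by
      rw [← Nat.cast_mul]; push_cast; omega
    have e2 : (t.length : Int) - (ℓ:Int) = ((t.length - ℓ : Nat) : Int) := by omega
    have e3 : (t.length : Int) - (k:Int)*(ℓ:Int) + (ℓ:Int) = ((t.length - (k-1)*ℓ : Nat) : Int) := by
      rw [← Nat.cast_mul]; push_cast; omega
    rw [e3, e1, e2, PySem.List.slice_natCast, PySem.List.slice_from_natCast]
    rw [e2] at hA
    have e4 : t.length - ℓ - (t.length - k*ℓ) = (k-1)*ℓ := by omega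
    rw [e4]
    rw [← Bool.decide_and]
    simp only [decide_eq_decide]
    rw [hA, ← pvChain_iff_shift t ℓ k hℓ1 hkn]
    constructor
    · rintro (h | h)
      · have : k = 1 := by omega
        subst this
        exact ⟨by push_cast; omega, fun j h2 hj => by omega⟩
      · refine ⟨hb1, fun j h2 hj => (h j (by omega) (by exact_mod_cast hj)).2⟩
    · rintro ⟨hkn', hch⟩
      rcases Nat.lt_or_ge k 2 with h2 | h2
      · left; omega
      · right; intro j hj1 hjk
        have hjk' : j ≤ k := by exact_mod_cast hjk
        exact ⟨le_trans (Nat.mul_le_mul_right ℓ hjk') hkn, hch j (by omega) hjk'⟩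
  · have hb1 : ¬ ((k:Int) * (ℓ:Int) ≤ (t.length:Int)) := by rw [← Nat.cast_mul]; omega
    rw [decide_eq_false hb1, Bool.false_and]
    apply decide_eq_false
    rw [hA]
    rintro (h | h)
    · have hk2 : k = 1 := by omega
      subst hk2
      simp only [one_mul] at hkn
      omega
    · rcases Nat.lt_or_ge k 2 with h2 | h2
      · have hk2 : k = 1 := by omega
        subst hk2
        simp only [one_mul] at hkn
        omega
      · have hc := (h k (by omega) (le_refl _)).1
        rw [← Nat.cast_mul] at hb1
        exact hb1 (by exact_mod_cast hc)


-- ===== VERDICT (by name: the statement is the Claim_ definition above) =====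
theorem detect_tail_copy_repetition_py_spec : Claim_equal_detect_tail_copy_repetition_py := by
  intro t mr _
  unfold Spec_detect_tail_copy_repetition_py
  unfold detect_tail_copy_repetition_py detect_tail_copy_repetition_py_alt
  by_cases hc : (t.length : Int) < 2 ∨ mr ≤ 0
  · simp only [if_pos hc]
  · simp only [if_neg hc]
    push_neg at hc
    apply pvAnyCongr
    intro L hL
    rw [PySem.List.mem_pyRange_one] at hL
    rw [PySem.Int.floordiv_eq_ediv_of_pos (by norm_num)] at hL
    exact pvPerL t mr L (by omega) (by omega) (by omega)
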